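-- pv_equiv track=rewrite | github.com/JoPieCastle/surveychecks | surveychecks/helper/parser.py | logicSplit
-- ===== SOURCE A (Python) =====
-- def logicSplit(evalString):
--
--     # splitting on &
--     logicSplitList = evalString.split("&")
--
--     for num, value in enumerate(logicSplitList):
--         # adding & to the eval string again at the beginning
--         if len(logicSplitList) - 1 == num:
--             pass
--         else:
--             logicSplitList[num + 1] = f"& {logicSplitList[num+1]}"
--
--     # splitting on |
--     for num, value in enumerate(logicSplitList):
--         if "|" in value:
--             secondSplit = value.split("|")
--
--             for numerodos, valuedos in enumerate(secondSplit):
--                 # appending |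
--                 if len(secondSplit) - 1 == numerodos:
--                     pass
--                 else:
--                     secondSplit[numerodos + 1] = f"| {secondSplit[numerodos+1]}"
--
--             logicSplitList[num] = secondSplit
--
--     # flattening hirarchies
--     flattenList = (
--         lambda irregular_list: [element for item in irregular_list for element in flattenList(item)]
--         if type(irregular_list) is list
--         else [irregular_list]
--     )
--
--     outList = []
--     for value in flattenList(logicSplitList):
--         if len(value) == 0:
--             pass
--         else:
--             outList.append(value)
--
--     return outList
-- ===== SOURCE B (Python) =====
-- def logicSplit(evalString):
--     # One linear scan: cut the string at every '&' / '|', starting the next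
--     # token with "& " / "| ", then drop the (only possibly empty) tokens.
--     result = []
--     current = ""
--     for ch in evalString:
--         if ch == "&":
--             result.append(current)
--             current = "& "
--         elif ch == "|":
--             result.append(current)
--             current = "| "
--         else:
--             current += ch
--     result.append(current)
--     return [t for t in result if t]
-- ===== Notes on version B (the rewrite author's own statement) =====
-- stated objective: simpler
-- what changed: Replaces A's split-on-&, per-piece split-on-|, prefix-patching enumerate loops and recursive flatten by a single linear character scan that emits tokens directly.
import Mathlib
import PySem

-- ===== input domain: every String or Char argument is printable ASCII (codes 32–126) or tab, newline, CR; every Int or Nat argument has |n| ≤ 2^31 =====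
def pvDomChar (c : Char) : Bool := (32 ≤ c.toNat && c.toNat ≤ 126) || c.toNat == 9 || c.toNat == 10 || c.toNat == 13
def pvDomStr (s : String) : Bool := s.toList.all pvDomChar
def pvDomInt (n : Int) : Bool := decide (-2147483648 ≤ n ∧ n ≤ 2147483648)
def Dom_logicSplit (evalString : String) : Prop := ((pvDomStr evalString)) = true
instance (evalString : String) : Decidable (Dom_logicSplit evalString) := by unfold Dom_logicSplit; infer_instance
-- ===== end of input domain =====

-- B replaces A's split-on-&/split-on-|/flatten pipeline by one linear token scan (objective: simpler).

-- ===== PORT A =====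
-- Strings are handled on the code-point list side, as PySem defines its string primitives;
-- the final tokens are converted back with String.ofList.
-- A's intermediate list holds both strings and lists of strings; LSItem is that sum.
inductive LSItem
  | str : List Char → LSItem
  | lst : List (List Char) → LSItem

-- A's "enumerate and prefix every element but the first" loop, transliterated:
-- a fold over the indices mutating (List.set) the list in place.
def lsPrefixLoop (p : List Char) (l : List (List Char)) : List (List Char) :=
  (List.range l.length).foldl
    (fun acc num =>
      if l.length - 1 = num then acc
      else acc.set (num + 1) (p ++ acc.getD (num + 1) []))
    l

def logicSplit (evalString : String) : List String :=
  -- splitting on & (s.split("&"); the separator is nonempty so split never raises)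
  let logicSplitList := PySem.Chars.splitOn evalString.toList ['&']
  -- adding & to the eval string again at the beginning
  let logicSplitList := lsPrefixLoop ['&', ' '] logicSplitList
  -- splitting on |
  let items := (List.range logicSplitList.length).foldl
    (fun acc num =>
      match acc.getD num (LSItem.str []) with
      | LSItem.str value =>
          if PySem.Chars.isIn ['|'] value then
            let secondSplit := PySem.Chars.splitOn value ['|']
            acc.set num (LSItem.lst (lsPrefixLoop ['|', ' '] secondSplit))
          else acc
      | LSItem.lst _ => acc)
    (logicSplitList.map LSItem.str)
  -- flattening hirarchies: A's recursive flatten lambda, exact on the depth-≤-2 data it is given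
  let flat := items.flatMap (fun it =>
    match it with
    | LSItem.str s => [s]
    | LSItem.lst l => l)
  -- dropping empty pieces
  (flat.foldl (fun outList value => if value.length = 0 then outList else outList ++ [value]) []).map
    String.ofList

-- ===== PORT B =====
def logicSplit_alt (evalString : String) : List String :=
  let st := evalString.toList.foldl
    (fun (st : List (List Char) × List Char) c =>
      if c = '&' then (st.1 ++ [st.2], ['&', ' '])
      else if c = '|' then (st.1 ++ [st.2], ['|', ' '])
      else (st.1, st.2 ++ [c]))
    ([], [])
  ((st.1 ++ [st.2]).filter (fun t => !t.isEmpty)).map String.ofList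

-- ===== PRECONDITION & SPEC =====
def Spec_logicSplit (evalString : String) (out : List String) : Prop := out = logicSplit_alt evalString
instance (evalString : String) (out : List String) : Decidable (Spec_logicSplit evalString out) := by unfold Spec_logicSplit; infer_instance

-- ===== CLAIM (what is proved, stated in full; the proofs are below) =====
def Claim_equal_logicSplit : Prop := ∀ (evalString : String), Dom_logicSplit evalString → Spec_logicSplit evalString (logicSplit evalString)

-- ===== LEMMAS AND PROOFS =====

-- structural single-character splitter (reference form of PySem.Chars.splitOn at a 1-char separator)
def splitC (d : Char) : List Char → List (List Char)
  | [] => [[]]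
  | c :: cs =>
      if c = d then [] :: splitC d cs
      else
        match splitC d cs with
        | [] => [[c]]
        | h :: t => (c :: h) :: t

def consPre (p : List Char) : List (List Char) → List (List Char)
  | [] => [p]
  | h :: t => (p ++ h) :: t

def ampMapL (p : List Char) : List (List Char) → List (List Char)
  | [] => []
  | h :: t => h :: t.map (p ++ ·)

def barTokL (v : List Char) : List (List Char) := ampMapL ['|', ' '] (splitC '|' v)

def altScanL : List Char → List Char → List (List Char)
  | [], cur => [cur]
  | c :: cs, cur =>
      if c = '&' then cur :: altScanL cs ['&', ' ']
      else if c = '|' then cur :: altScanL cs ['|', ' ']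
      else altScanL cs (cur ++ [c])

theorem splitC_ne_nil (d : Char) (l : List Char) : splitC d l ≠ [] := by
  cases l with
  | nil => simp [splitC]
  | cons c cs =>
      simp only [splitC]
      split
      · simp
      · cases h : splitC d cs <;> simp

theorem go_eq (d : Char) (l : List Char) (fuel : Nat) (cur : List Char) (acc : List (List Char))
    (h : l.length < fuel) :
    PySem.Chars.splitOn.go [d] fuel l cur acc = acc.reverse ++ consPre cur.reverse (splitC d l) := by
  induction l generalizing fuel cur acc with
  | nil =>
      cases fuel with
      | zero => omega
      | succ f => simp [PySem.Chars.splitOn.go, splitC, consPre]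
  | cons c cs ih =>
      cases fuel with
      | zero => omega
      | succ f =>
        rw [PySem.Chars.splitOn.go]
        by_cases hc : c = d
        · subst hc
          have hp : List.isPrefixOf [c] (c :: cs) = true := by simp [List.isPrefixOf]
          simp only [hp, if_pos, List.length_cons, List.length_nil, Nat.zero_add,
            List.drop_succ_cons, List.drop_zero]
          rw [ih f [] (cur.reverse :: acc) (by simpa using h)]
          simp [splitC, consPre]
          cases hsp : splitC c cs with
          | nil => exact absurd hsp (splitC_ne_nil c cs)
          | cons h0 t => simp [consPre]
        · have hp : List.isPrefixOf [d] (c :: cs) = false := by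
            simp [List.isPrefixOf]
            exact fun hdc => absurd hdc.symm hc
          simp only [hp]
          rw [if_neg (by simp)]
          rw [ih f (c :: cur) acc (by simpa using h)]
          simp only [splitC, if_neg hc]
          cases hsp : splitC d cs with
          | nil => exact absurd hsp (splitC_ne_nil d cs)
          | cons h0 t => simp [consPre]

theorem splitOn_single (d : Char) (l : List Char) :
    PySem.Chars.splitOn l [d] = splitC d l := by
  unfold PySem.Chars.splitOn
  rw [go_eq d l (l.length + 1) [] [] (by omega)]
  cases hsp : splitC d l with
  | nil => exact absurd hsp (splitC_ne_nil d l)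
  | cons h0 t => simp [consPre]

theorem consPre_nil_of_ne (X : List (List Char)) (hX : X ≠ []) : consPre [] X = X := by
  cases X with
  | nil => simp at hX
  | cons h t => simp [consPre]

theorem consPre_consPre (p q : List Char) (X : List (List Char)) :
    consPre p (consPre q X) = consPre (p ++ q) X := by
  cases X <;> simp [consPre]

theorem consPre_append (p : List Char) (X Y : List (List Char)) (hX : X ≠ []) :
    consPre p X ++ Y = consPre p (X ++ Y) := by
  cases X with
  | nil => simp at hX
  | cons h t => simp [consPre]

theorem map_append_eq_consPre_ampMap (p : List Char) (X : List (List Char)) (hX : X ≠ []) :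
    X.map (p ++ ·) = consPre p (ampMapL p X) := by
  cases X with
  | nil => simp at hX
  | cons h t => simp [consPre, ampMapL]

theorem ampMapL_ne_nil (p : List Char) (X : List (List Char)) (hX : X ≠ []) : ampMapL p X ≠ [] := by
  cases X with
  | nil => simp at hX
  | cons h t => simp [ampMapL]

theorem splitC_of_not_mem (d : Char) (v : List Char) (h : d ∉ v) : splitC d v = [v] := by
  induction v with
  | nil => simp [splitC]
  | cons c cs ih =>
      simp only [List.mem_cons, not_or] at h
      have hcd : ¬ c = d := fun hh => h.1 hh.symm
      simp [splitC, hcd, ih h.2]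

theorem splitC_append_of_not_mem (d : Char) (x y : List Char) (h : d ∉ x) :
    splitC d (x ++ d :: y) = x :: splitC d y := by
  induction x with
  | nil => simp [splitC]
  | cons c cs ih =>
      simp only [List.mem_cons, not_or] at h
      have hcd : ¬ c = d := fun hh => h.1 hh.symm
      simp only [List.cons_append, splitC, if_neg hcd, ih h.2]

theorem barTokL_of_not_mem (v : List Char) (h : '|' ∉ v) : barTokL v = [v] := by
  simp [barTokL, splitC_of_not_mem '|' v h, ampMapL]

theorem altScanL_ne_nil (cs cur : List Char) : altScanL cs cur ≠ [] := by
  cases cs with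
  | nil => simp [altScanL]
  | cons c t =>
      simp only [altScanL]
      split
      · simp
      · split
        · simp
        · exact altScanL_ne_nil t (cur ++ [c])

theorem altScanL_consPre (cs cur : List Char) :
    altScanL cs cur = consPre cur (altScanL cs []) := by
  induction cs generalizing cur with
  | nil => simp [altScanL, consPre]
  | cons c t ih =>
      by_cases hc : c = '&'
      · subst hc; simp [altScanL, consPre]
      · by_cases hp : c = '|'
        · subst hp; simp [altScanL, consPre, hc]
        · simp only [altScanL, if_neg hc, if_neg hp, List.nil_append]
          rw [ih (cur ++ [c]), ih [c], consPre_consPre]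

-- the heart: A's two-level split pipeline produces exactly B's scan tokens
theorem main_tok (cs : List Char) (pre : List Char) (hpre : '|' ∉ pre) :
    (consPre pre (ampMapL ['&', ' '] (splitC '&' cs))).flatMap barTokL = altScanL cs pre := by
  induction cs generalizing pre with
  | nil =>
      simp [splitC, ampMapL, consPre, altScanL, List.flatMap, barTokL_of_not_mem pre hpre]
  | cons c t ih =>
      by_cases hc : c = '&'
      · subst hc
        obtain ⟨q0, qt, hq⟩ : ∃ q0 qt, splitC '&' t = q0 :: qt := by
          cases h : splitC '&' t with
          | nil => exact absurd h (splitC_ne_nil _ _)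
          | cons a b => exact ⟨a, b, rfl⟩
        simp only [splitC, if_pos rfl, if_true, hq, ampMapL, consPre, List.map_cons]
        rw [show (['&', ' '] ++ q0) :: qt.map (['&', ' '] ++ ·)
              = consPre ['&', ' '] (ampMapL ['&', ' '] (q0 :: qt)) by simp [consPre, ampMapL]]
        simp only [List.flatMap_cons]
        rw [show pre ++ [] = pre by simp, barTokL_of_not_mem pre hpre]
        rw [← hq, ih ['&', ' '] (by decide)]
        simp [altScanL]
      · by_cases hp : c = '|'
        · subst hp
          obtain ⟨q0, qt, hq⟩ : ∃ q0 qt, splitC '&' t = q0 :: qt := by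
            cases h : splitC '&' t with
            | nil => exact absurd h (splitC_ne_nil _ _)
            | cons a b => exact ⟨a, b, rfl⟩
          simp only [splitC, if_neg hc, hq, ampMapL, consPre, List.map_cons, List.flatMap_cons]
          have hbar : barTokL (pre ++ '|' :: q0)
              = pre :: consPre ['|', ' '] (barTokL q0) := by
            unfold barTokL
            rw [splitC_append_of_not_mem '|' pre q0 hpre]
            simp only [ampMapL]
            rw [map_append_eq_consPre_ampMap ['|', ' '] (splitC '|' q0) (splitC_ne_nil _ _)]
            rfl
          rw [hbar]
          have hbt : barTokL q0 ≠ [] :=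
            ampMapL_ne_nil _ _ (splitC_ne_nil _ _)
          rw [List.cons_append, consPre_append ['|', ' '] (barTokL q0) _ hbt]
          have : barTokL q0 ++ (qt.map (['&', ' '] ++ ·)).flatMap barTokL
              = (consPre [] (ampMapL ['&', ' '] (splitC '&' t))).flatMap barTokL := by
            rw [consPre_nil_of_ne _ (ampMapL_ne_nil _ _ (splitC_ne_nil _ _))]
            rw [hq]
            simp [ampMapL, List.flatMap_cons]
          rw [this, ih [] (by decide)]
          rw [← altScanL_consPre]
          simp [altScanL, hc]
        · obtain ⟨q0, qt, hq⟩ : ∃ q0 qt, splitC '&' t = q0 :: qt := by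
            cases h : splitC '&' t with
            | nil => exact absurd h (splitC_ne_nil _ _)
            | cons a b => exact ⟨a, b, rfl⟩
          simp only [splitC, if_neg hc, hq, ampMapL, consPre, List.map_cons]
          have : ((pre ++ c :: q0) :: qt.map (['&', ' '] ++ ·))
              = consPre (pre ++ [c]) (ampMapL ['&', ' '] (splitC '&' t)) := by
            rw [hq]; simp [consPre, ampMapL]
          rw [this, ih (pre ++ [c]) (by simp [hpre]; exact fun h => absurd h.symm hp)]
          simp [altScanL, if_neg hc, if_neg hp]

theorem prefix_aux (p : List Char) (hd : List Char) (t : List (List Char)) (k : Nat)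
    (hk : k ≤ t.length) :
    (List.range k).foldl
      (fun acc num =>
        if (hd :: t).length - 1 = num then acc
        else acc.set (num + 1) (p ++ acc.getD (num + 1) []))
      (hd :: t)
    = hd :: ((t.take k).map (p ++ ·) ++ t.drop k) := by
  induction k with
  | zero => simp
  | succ k ih =>
      have hkt : k < t.length := hk
      rw [List.range_succ, List.foldl_append, ih (Nat.le_of_lt hkt)]
      simp only [List.foldl_cons, List.foldl_nil]
      rw [if_neg (by simp; omega)]
      have hdrop : t.drop k = t[k] :: t.drop (k + 1) := List.drop_eq_getElem_cons hkt
      have hlen : ((t.take k).map (p ++ ·)).length = k := by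
        simp [Nat.min_eq_left (Nat.le_of_lt hkt)]
      rw [hdrop, List.getD_cons_succ, List.set_cons_succ]
      have hget : ((t.take k).map (p ++ ·) ++ t[k] :: t.drop (k + 1)).getD k [] = t[k] := by
        rw [List.getD_eq_getElem?_getD, List.getElem?_append_right hlen.le, hlen]
        simp only [Nat.sub_self, List.getElem?_cons_zero, Option.getD_some]
      have hset : ((t.take k).map (p ++ ·) ++ t[k] :: t.drop (k + 1)).set k (p ++ t[k])
          = (t.take k).map (p ++ ·) ++ (p ++ t[k]) :: t.drop (k + 1) := by
        rw [List.set_append_right _ _ hlen.le, hlen]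
        simp only [Nat.sub_self, List.set_cons_zero]
      rw [hget, hset]
      rw [List.take_add_one, List.getElem?_eq_getElem hkt]
      simp only [Option.toList_some, List.map_append, List.map_cons, List.map_nil,
        List.append_assoc, List.singleton_append, List.cons_append, List.nil_append]

-- lsPrefixLoop is "keep the head, prefix every later element"
theorem lsPrefixLoop_eq (p : List Char) (l : List (List Char)) :
    lsPrefixLoop p l = ampMapL p l := by
  cases l with
  | nil => simp [lsPrefixLoop, ampMapL]
  | cons hd t =>
      unfold lsPrefixLoop
      rw [show List.range (hd :: t).length = List.range t.length ++ [t.length] from by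
        simp [List.range_succ]]
      rw [List.foldl_append, prefix_aux p hd t t.length (Nat.le_refl _)]
      simp only [List.foldl_cons, List.foldl_nil]
      rw [if_pos (by simp)]
      simp [ampMapL]

-- the index fold of A's second loop acts elementwise
theorem items_fold_eq (l : List (List Char)) :
    (List.range l.length).foldl
      (fun acc num =>
        match acc.getD num (LSItem.str []) with
        | LSItem.str value =>
            if PySem.Chars.isIn ['|'] value then
              acc.set num (LSItem.lst (lsPrefixLoop ['|', ' '] (PySem.Chars.splitOn value ['|'])))
            else acc
        | LSItem.lst _ => acc)
      (l.map LSItem.str)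
    = l.map (fun v =>
        if PySem.Chars.isIn ['|'] v then
          LSItem.lst (lsPrefixLoop ['|', ' '] (PySem.Chars.splitOn v ['|']))
        else LSItem.str v) := by
  have aux : ∀ k ≤ l.length,
      (List.range k).foldl
        (fun acc num =>
          match acc.getD num (LSItem.str []) with
          | LSItem.str value =>
              if PySem.Chars.isIn ['|'] value then
                acc.set num (LSItem.lst (lsPrefixLoop ['|', ' '] (PySem.Chars.splitOn value ['|'])))
              else acc
          | LSItem.lst _ => acc)
        (l.map LSItem.str)
      = (l.take k).map (fun v =>
          if PySem.Chars.isIn ['|'] v then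
            LSItem.lst (lsPrefixLoop ['|', ' '] (PySem.Chars.splitOn v ['|']))
          else LSItem.str v) ++ (l.drop k).map LSItem.str := by
    intro k hk
    induction k with
    | zero => simp
    | succ k ih =>
        have hkt : k < l.length := hk
        rw [List.range_succ, List.foldl_append, ih (Nat.le_of_lt hkt)]
        simp only [List.foldl_cons, List.foldl_nil]
        have hdrop : l.drop k = l[k] :: l.drop (k + 1) := List.drop_eq_getElem_cons hkt
        have hlen : ((l.take k).map (fun v =>
            if PySem.Chars.isIn ['|'] v then
              LSItem.lst (lsPrefixLoop ['|', ' '] (PySem.Chars.splitOn v ['|']))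
            else LSItem.str v)).length = k := by
          simp [Nat.min_eq_left (Nat.le_of_lt hkt)]
        rw [hdrop]
        simp only [List.map_cons]
        have hget : ((l.take k).map (fun v =>
            if PySem.Chars.isIn ['|'] v then
              LSItem.lst (lsPrefixLoop ['|', ' '] (PySem.Chars.splitOn v ['|']))
            else LSItem.str v) ++ LSItem.str l[k] :: (l.drop (k + 1)).map LSItem.str).getD k
              (LSItem.str []) = LSItem.str l[k] := by
          rw [List.getD_eq_getElem?_getD, List.getElem?_append_right hlen.le, hlen]
          simp only [Nat.sub_self, List.getElem?_cons_zero, Option.getD_some]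
        rw [hget]
        dsimp only
        rw [List.take_add_one, List.getElem?_eq_getElem hkt]
        by_cases hv : PySem.Chars.isIn ['|'] l[k] = true
        · rw [if_pos hv]
          rw [List.set_append_right _ _ hlen.le, hlen]
          simp only [Nat.sub_self, List.set_cons_zero]
          simp only [Option.toList_some, List.map_append, List.map_cons, List.map_nil,
            List.append_assoc, List.cons_append, List.nil_append, List.singleton_append,
            if_pos hv]
        · rw [if_neg hv]
          simp only [Option.toList_some, List.map_append, List.map_cons, List.map_nil,
            List.append_assoc, List.cons_append, List.nil_append, List.singleton_append,
            if_neg hv]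
  have := aux l.length (Nat.le_refl _)
  simpa using this

-- B's accumulator scan in terms of altScanL
theorem alt_fold_eq (cs : List Char) (res : List (List Char)) (cur : List Char) :
    (cs.foldl
      (fun (st : List (List Char) × List Char) c =>
        if c = '&' then (st.1 ++ [st.2], ['&', ' '])
        else if c = '|' then (st.1 ++ [st.2], ['|', ' '])
        else (st.1, st.2 ++ [c]))
      (res, cur)).1
    ++ [(cs.foldl
      (fun (st : List (List Char) × List Char) c =>
        if c = '&' then (st.1 ++ [st.2], ['&', ' '])
        else if c = '|' then (st.1 ++ [st.2], ['|', ' '])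
        else (st.1, st.2 ++ [c]))
      (res, cur)).2]
    = res ++ altScanL cs cur := by
  induction cs generalizing res cur with
  | nil => simp [altScanL]
  | cons c t ih =>
      by_cases hc : c = '&'
      · subst hc; simp only [List.foldl_cons, if_pos rfl, altScanL]
        rw [ih]; simp
      · by_cases hp : c = '|'
        · subst hp; simp only [List.foldl_cons, if_neg hc, if_pos rfl, altScanL]
          rw [ih]; simp
        · simp only [List.foldl_cons, if_neg hc, if_neg hp, altScanL]
          rw [ih]

-- ===== VERDICT (by name: the statement is the Claim_ definition above) =====
-- the A-side pipeline on the raw character list equals B's scan tokens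
theorem pipeline_eq (cs : List Char) :
    List.flatMap
      (fun it =>
        match it with
        | LSItem.str s => [s]
        | LSItem.lst l => l)
      ((lsPrefixLoop ['&', ' '] (PySem.Chars.splitOn cs ['&'])).map (fun v =>
        if PySem.Chars.isIn ['|'] v then
          LSItem.lst (lsPrefixLoop ['|', ' '] (PySem.Chars.splitOn v ['|']))
        else LSItem.str v))
    = altScanL cs [] := by
  rw [List.flatMap_map]
  have hcongr : ∀ v : List Char,
      (fun it =>
        match it with
        | LSItem.str s => [s]
        | LSItem.lst l => l)
      ((fun v =>
        if PySem.Chars.isIn ['|'] v then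
          LSItem.lst (lsPrefixLoop ['|', ' '] (PySem.Chars.splitOn v ['|']))
        else LSItem.str v) v) = barTokL v := by
    intro v
    by_cases hv : PySem.Chars.isIn ['|'] v = true
    · simp only [if_pos hv]
      rw [lsPrefixLoop_eq, splitOn_single]
      rfl
    · simp only [if_neg hv]
      have : '|' ∉ v := by
        have := (PySem.Chars.isIn_eq_false_iff ['|'] v).mp (by simpa using hv)
        intro hm
        exact this ((List.singleton_infix_iff _ _).mpr hm)
      rw [barTokL_of_not_mem v this]
  rw [funext hcongr]
  rw [splitOn_single, lsPrefixLoop_eq]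
  rw [← consPre_nil_of_ne (ampMapL ['&', ' '] (splitC '&' cs))
        (ampMapL_ne_nil _ _ (splitC_ne_nil _ _))]
  exact main_tok cs [] (by decide)

-- ===== VERDICT (by name: the statement is the Claim_ definition above) =====
theorem logicSplit_spec : Claim_equal_logicSplit := by
  intro s _
  unfold Spec_logicSplit logicSplit logicSplit_alt
  simp only []
  rw [items_fold_eq, pipeline_eq]
  rw [alt_fold_eq s.toList [] []]
  rw [List.nil_append]
  -- A's append-unless-empty fold is a filter
  have hfun : (fun (outList : List (List Char)) (value : List Char) =>
        if value.length = 0 then outList else outList ++ [value])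
      = (fun outList value =>
        if (!(value.isEmpty)) = true then outList ++ [id value] else outList) := by
    funext a v
    cases v <;> simp
  rw [hfun, PySem.List.foldl_append_if (fun t => !t.isEmpty) id (altScanL s.toList []) []]
  simp
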